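-- pv_equiv track=rewrite | github.com/2JINSEOK/Algorithms | Python/플레이페어 암호.py | getLocationofKey
-- ===== SOURCE A (Python) =====
-- def getLocationofKey(li, key_str2lst):
--     save_idx = []
--     for i in range(len(key_str2lst)): # row = 5
--         for j in range(len(key_str2lst[i])): # 열
--             if li[0] == key_str2lst[i][j]: # 두 개씩 쪼개서 넣은 li
--                 save_idx.append((i, j)) # 첫번째 글자 해당되는 위치 저장
--
--     for i in range(len(key_str2lst)):
--         for j in range(len(key_str2lst[i])):
--             if li[1] == key_str2lst[i][j]:
--                 save_idx.append((i, j)) # save_idx = [[i1 , j1], [i2 , j2]]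
--
--     return save_idx # 위치 좌표 반환
-- ===== SOURCE B (Python) =====
-- def getLocationofKey(li, key_str2lst):
--     # one row-major pass: flat (char, position) list, grouped into a dict, then two lookups
--     cells = [(ch, (i, j)) for i, row in enumerate(key_str2lst) for j, ch in enumerate(row)]
--     idx = {}
--     for ch, pos in cells:
--         idx.setdefault(ch, []).append(pos)
--     return idx.get(li[0], []) + idx.get(li[1], [])
-- ===== Notes on version B (the rewrite author's own statement) =====
-- stated objective: idiomatic
-- what changed: Replaces A's two full nested grid scans by one row-major pass that builds a char->positions dict, then returns the concatenation of two constant-time lookups (absent chars give []; li[0]==li[1] still yields each position twice).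
-- outside the precondition, e.g. on getLocationofKey([], []): A returns [], B raises IndexError
import Mathlib
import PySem

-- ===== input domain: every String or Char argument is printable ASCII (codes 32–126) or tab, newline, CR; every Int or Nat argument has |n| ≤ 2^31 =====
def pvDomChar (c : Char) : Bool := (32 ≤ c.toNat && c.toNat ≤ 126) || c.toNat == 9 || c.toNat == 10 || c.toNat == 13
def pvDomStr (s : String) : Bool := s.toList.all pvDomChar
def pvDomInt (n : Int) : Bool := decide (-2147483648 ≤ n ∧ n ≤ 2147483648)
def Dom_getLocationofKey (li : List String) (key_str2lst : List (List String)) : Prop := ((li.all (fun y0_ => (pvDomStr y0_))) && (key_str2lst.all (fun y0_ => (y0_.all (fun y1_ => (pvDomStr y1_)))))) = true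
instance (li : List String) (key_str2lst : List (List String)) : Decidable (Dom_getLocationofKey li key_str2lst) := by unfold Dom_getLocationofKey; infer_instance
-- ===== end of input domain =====

-- B builds a char->positions index in one row-major pass and concatenates two lookups,
-- instead of A's two full nested scans of the grid (same return value; idiomatic rewrite).


-- ===== PORT A =====
-- literal port of A's two range(len)-indexed nested scans; li[0]/li[1] are read with
-- default "" (Pre_ guarantees they exist wherever the Python reads them)
def getLocationofKey (li : List String) (key_str2lst : List (List String)) : List (Int × Int) :=
  let s1 : List (Int × Int) :=
    (PySem.List.pyRange 0 (PySem.List.len key_str2lst) 1).foldl (fun acc i =>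
      (PySem.List.pyRange 0 (PySem.List.len (PySem.List.pyGetD key_str2lst i [])) 1).foldl (fun acc2 j =>
        if PySem.List.pyGetD li 0 "" == PySem.List.pyGetD (PySem.List.pyGetD key_str2lst i []) j "" then
          acc2 ++ [(i, j)] else acc2) acc) []
  (PySem.List.pyRange 0 (PySem.List.len key_str2lst) 1).foldl (fun acc i =>
    (PySem.List.pyRange 0 (PySem.List.len (PySem.List.pyGetD key_str2lst i [])) 1).foldl (fun acc2 j =>
      if PySem.List.pyGetD li 1 "" == PySem.List.pyGetD (PySem.List.pyGetD key_str2lst i []) j "" then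
        acc2 ++ [(i, j)] else acc2) acc) s1

-- ===== PORT B =====
def getLocationofKey_alt (li : List String) (key_str2lst : List (List String)) : List (Int × Int) :=
  let cells : List (String × (Int × Int)) :=
    (PySem.List.enumerate key_str2lst 0).flatMap (fun p =>
      (PySem.List.enumerate p.2 0).map (fun q => (q.2, (p.1, q.1))))
  let idx : PySem.Dict String (List (Int × Int)) :=
    cells.foldl (fun d c => d.modify c.1 [] (· ++ [c.2])) PySem.Dict.empty
  idx.getD (PySem.List.pyGetD li 0 "") [] ++ idx.getD (PySem.List.pyGetD li 1 "") []

-- ===== PRECONDITION & SPEC =====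
-- Pre_ requires li to have at least two elements: A reads li[0]/li[1] only inside the cell
-- loops, so on a grid with no cells A accidentally returns [] for shorter li (an artefact of
-- the loop never running) while B's unconditional li[0]/li[1] lookups raise IndexError there.
def Pre_getLocationofKey (li : List String) (key_str2lst : List (List String)) : Prop :=
  2 ≤ li.length
instance (li : List String) (key_str2lst : List (List String)) : Decidable (Pre_getLocationofKey li key_str2lst) := by unfold Pre_getLocationofKey; infer_instance
def pvWitness_getLocationofKey : List String × List (List String) :=
  (["a", "b"], [["a", "c"], ["b", "a"]])

def Spec_getLocationofKey (li : List String) (key_str2lst : List (List String)) (out : List (Int × Int)) : Prop := out = getLocationofKey_alt li key_str2lst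
instance (li : List String) (key_str2lst : List (List String)) (out : List (Int × Int)) : Decidable (Spec_getLocationofKey li key_str2lst out) := by unfold Spec_getLocationofKey; infer_instance

-- ===== CLAIM (what is proved, stated in full; the proofs are below) =====
def Claim_equal_getLocationofKey : Prop := ∀ (li : List String) (key_str2lst : List (List String)), Dom_getLocationofKey li key_str2lst → Pre_getLocationofKey li key_str2lst → Spec_getLocationofKey li key_str2lst (getLocationofKey li key_str2lst)

-- ===== LEMMAS AND PROOFS =====

-- enumerate over a snoc appends the last indexed element
theorem pv_enumerate_append_singleton {α : Type} (xs : List α) (x : α) :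
    ∀ s : Int, PySem.List.enumerate (xs ++ [x]) s
      = PySem.List.enumerate xs s ++ [((s + xs.length : Int), x)] := by
  induction xs with
  | nil => intro s; simp [PySem.List.enumerate_cons, PySem.List.enumerate_nil]
  | cons y ys ih =>
      intro s
      simp [PySem.List.enumerate_cons, ih (s + 1)]
      ring_nf

-- an index loop 'for i in range(len(xs)): … xs[i] …' that also uses i is the fold over enumerate
theorem pv_idxloop {α β : Type} (xs : List α) (d : α) (g : β → Int → α → β) (init : β) :
    (PySem.List.pyRange 0 (xs.length : Int) 1).foldl
        (fun acc i => g acc i (PySem.List.pyGetD xs i d)) init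
      = (PySem.List.enumerate xs 0).foldl (fun acc p => g acc p.1 p.2) init := by
  induction xs using List.reverseRecOn generalizing init with
  | nil => simp [PySem.List.pyRange_one_eq_nil, PySem.List.enumerate_nil]
  | append_singleton ys x ih =>
      have h1 : ((ys ++ [x]).length : Int) = (ys.length : Int) + 1 := by simp
      rw [h1, PySem.List.pyRange_one_succ_right (by positivity), List.foldl_append,
        pv_enumerate_append_singleton, List.foldl_append]
      simp only [List.foldl_cons, List.foldl_nil, zero_add]
      have hmid : PySem.List.pyGetD (ys ++ [x]) (ys.length : Int) d = x := by
        rw [PySem.List.pyGetD_eq_getElem _ _ (by positivity) (by simp)]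
        simp
      rw [hmid]
      congr 1
      rw [PySem.List.foldl_congr_mem (g := fun acc i => g acc i (PySem.List.pyGetD ys i d))]
      · exact ih init
      · intro acc i hi
        rw [PySem.List.mem_pyRange_one] at hi
        congr 1
        rw [PySem.List.pyGetD_eq_getElem _ _ (by omega) (by simp; omega),
          PySem.List.pyGetD_eq_getElem _ _ (by omega) (by omega)]
        rw [List.getElem_append_left]

-- A's single scan for character c, as a closed form over the cell list
theorem pv_scan_eq {c : String} (key_str2lst : List (List String)) (init : List (Int × Int)) :
    (PySem.List.pyRange 0 (PySem.List.len key_str2lst) 1).foldl (fun acc i =>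
        (PySem.List.pyRange 0 (PySem.List.len (PySem.List.pyGetD key_str2lst i [])) 1).foldl (fun acc2 j =>
          if c == PySem.List.pyGetD (PySem.List.pyGetD key_str2lst i []) j "" then
            acc2 ++ [(i, j)] else acc2) acc) init
      = init ++ (PySem.List.enumerate key_str2lst 0).flatMap (fun p =>
          ((PySem.List.enumerate p.2 0).filter (fun q => c == q.2)).map (fun q => (p.1, q.1))) := by
  rw [show PySem.List.len key_str2lst = (key_str2lst.length : Int) from by simp [PySem.List.len]]
  rw [pv_idxloop key_str2lst [] (fun acc i row =>
    (PySem.List.pyRange 0 (PySem.List.len row) 1).foldl (fun acc2 j =>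
      if c == PySem.List.pyGetD row j "" then acc2 ++ [(i, j)] else acc2) acc) init]
  rw [PySem.List.foldl_congr_mem (g := fun acc p => acc ++
    ((PySem.List.enumerate p.2 0).filter (fun q => c == q.2)).map (fun q => (p.1, q.1)))]
  · exact PySem.List.foldl_append_eq_flatMap _ _ _
  · intro acc p _
    rw [show PySem.List.len p.2 = (p.2.length : Int) from by simp [PySem.List.len]]
    rw [pv_idxloop p.2 "" (fun acc2 j ch => if c == ch then acc2 ++ [(p.1, j)] else acc2) acc]
    rw [PySem.List.foldl_congr_mem (g := fun acc2 q =>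
      if (fun q : Int × String => c == q.2) q then acc2 ++ [(fun q : Int × String => (p.1, q.1)) q] else acc2)]
    · exact PySem.List.foldl_append_if _ _ _ _
    · intro acc2 q _; rfl

-- B's dict lookup for character c is the same closed form
theorem pv_lookup_eq (c : String) (key_str2lst : List (List String)) :
    (((PySem.List.enumerate key_str2lst 0).flatMap (fun p =>
        (PySem.List.enumerate p.2 0).map (fun q => (q.2, (p.1, q.1))))).foldl
          (fun d cl => d.modify cl.1 [] (· ++ [cl.2])) PySem.Dict.empty).getD c []
      = (PySem.List.enumerate key_str2lst 0).flatMap (fun p =>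
          ((PySem.List.enumerate p.2 0).filter (fun q => c == q.2)).map (fun q => (p.1, q.1))) := by
  rw [PySem.Dict.getD_foldl_modify_append]
  rw [PySem.Dict.getD_empty, List.nil_append]
  rw [List.filter_flatMap, List.map_flatMap]
  apply List.flatMap_congr
  intro p _
  rw [List.filter_map, List.map_map]
  congr 1
  apply List.filter_congr
  intro q _
  simp [Function.comp, BEq.comm]

-- ===== VERDICT (by name: the statement is the Claim_ definition above) =====
theorem getLocationofKey_spec : Claim_equal_getLocationofKey := by
  intro li key _ _
  unfold Spec_getLocationofKey getLocationofKey getLocationofKey_alt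
  simp only
  rw [pv_scan_eq, pv_scan_eq, pv_lookup_eq, pv_lookup_eq]
  simp
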